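-- pv_equiv track=rewrite | github.com/dimichoueiry/SelfHub | packages/selfhub-cli/src/selfhub_cli/service.py | _latest_content_line_index
-- ===== SOURCE A (Python) =====
-- def _latest_content_line_index(lines: list[str]) -> int | None:
--     for index in range(len(lines) - 1, -1, -1):
--         stripped = lines[index].strip()
--         if not stripped:
--             continue
--         if stripped.startswith("#"):
--             continue
--         return index
--     return None
-- ===== SOURCE B (Python) =====
-- def _latest_content_line_index(lines: list[str]) -> int | None:
--     result = None
--     for index, line in enumerate(lines):
--         stripped = line.strip()
--         if stripped and not stripped.startswith("#"):
--             result = index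
--     return result
-- ===== Notes on version B (the rewrite author's own statement) =====
-- stated objective: simpler
-- what changed: Replaces the backward early-exit scan over range(len-1,-1,-1) with a forward single pass using enumerate that keeps overwriting the last matching index in an accumulator.
import Mathlib
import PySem

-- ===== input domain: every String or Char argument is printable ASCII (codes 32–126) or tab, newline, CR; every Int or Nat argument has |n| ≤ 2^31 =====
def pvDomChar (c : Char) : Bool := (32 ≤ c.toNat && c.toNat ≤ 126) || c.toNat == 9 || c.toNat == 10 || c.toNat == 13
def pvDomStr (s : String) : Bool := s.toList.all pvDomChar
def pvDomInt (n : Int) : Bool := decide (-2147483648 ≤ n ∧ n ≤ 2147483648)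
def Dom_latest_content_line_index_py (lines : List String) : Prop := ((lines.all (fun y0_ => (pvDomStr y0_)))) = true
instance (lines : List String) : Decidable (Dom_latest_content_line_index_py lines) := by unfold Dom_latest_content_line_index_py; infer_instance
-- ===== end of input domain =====

-- ===== PORT A =====
-- B is a simpler forward single pass accumulating the last matching index (no speed claim).
-- Loop 'for index in range(len(lines)-1, -1, -1)' with early return, as recursion over the range list.
def pvALoop (lines : List String) : List Int → Option Int
  | [] => none
  | i :: rest =>
    let stripped := PySem.Str.strip ((PySem.List.pyGet? lines i).getD "")
    if stripped = "" then pvALoop lines rest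
    else if PySem.Str.startswith stripped "#" then pvALoop lines rest
    else some i

def latest_content_line_index_py (lines : List String) : Option Int :=
  pvALoop lines (PySem.List.pyRange ((lines.length : Int) - 1) (-1) (-1))

-- ===== PORT B =====
def latest_content_line_index_py_alt (lines : List String) : Option Int :=
  (PySem.List.enumerate lines).foldl
    (fun result p =>
      let stripped := PySem.Str.strip p.2
      if stripped ≠ "" ∧ PySem.Str.startswith stripped "#" = false then some p.1 else result)
    none

-- ===== PRECONDITION & SPEC =====
def Spec_latest_content_line_index_py (lines : List String) (out : Option Int) : Prop := out = latest_content_line_index_py_alt lines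
instance (lines : List String) (out : Option Int) : Decidable (Spec_latest_content_line_index_py lines out) := by unfold Spec_latest_content_line_index_py; infer_instance

-- ===== CLAIM (what is proved, stated in full; the proofs are below) =====
def Claim_equal_latest_content_line_index_py : Prop := ∀ (lines : List String), Dom_latest_content_line_index_py lines → Spec_latest_content_line_index_py lines (latest_content_line_index_py lines)

-- ===== LEMMAS AND PROOFS =====

theorem pvALoop_congr (xs ys : List String) (l : List Int)
    (h : ∀ i ∈ l, PySem.List.pyGet? xs i = PySem.List.pyGet? ys i) :
    pvALoop xs l = pvALoop ys l := by
  induction l with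
  | nil => rfl
  | cons i rest ih =>
    have hi := h i (List.mem_cons_self ..)
    have hr : ∀ j ∈ rest, PySem.List.pyGet? xs j = PySem.List.pyGet? ys j :=
      fun j hj => h j (List.mem_cons_of_mem _ hj)
    simp only [pvALoop, hi, ih hr]

theorem pvGet_append_left (xs : List String) (x : String) (i : Int)
    (h0 : 0 ≤ i) (h1 : i < (xs.length : Int)) :
    PySem.List.pyGet? (xs ++ [x]) i = PySem.List.pyGet? xs i := by
  have hn : i.toNat < xs.length := by omega
  simp [PySem.List.pyGet?, PySem.List.pyIdx?, h0]
  rw [if_pos (le_of_lt h1), if_pos h1]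
  simp [List.getElem?_append_left hn]

theorem pvGet_append_last (xs : List String) (x : String) :
    PySem.List.pyGet? (xs ++ [x]) (xs.length : Int) = some x := by
  simp [PySem.List.pyGet?, PySem.List.pyIdx?]

theorem pvB_append (xs : List String) (x : String) :
    latest_content_line_index_py_alt (xs ++ [x]) =
      (if PySem.Str.strip x ≠ "" ∧ PySem.Str.startswith (PySem.Str.strip x) "#" = false
        then some (xs.length : Int) else latest_content_line_index_py_alt xs) := by
  simp [latest_content_line_index_py_alt, PySem.List.enumerate_append,
    List.foldl_append, PySem.List.enumerate_cons]

theorem pvAB (lines : List String) :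
    latest_content_line_index_py lines = latest_content_line_index_py_alt lines := by
  induction lines using List.reverseRecOn with
  | nil =>
    simp [latest_content_line_index_py, latest_content_line_index_py_alt,
      PySem.List.pyRange_neg_one_eq_nil (by norm_num : (-1 : Int) ≤ -1), pvALoop,
      PySem.List.enumerate_nil]
  | append_singleton xs x ih =>
    rw [pvB_append]
    have hlen : ((xs ++ [x]).length : Int) - 1 = (xs.length : Int) := by
      simp
    have hcons : PySem.List.pyRange ((xs.length : Int)) (-1) (-1)
        = (xs.length : Int) :: PySem.List.pyRange ((xs.length : Int) - 1) (-1) (-1) :=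
      PySem.List.pyRange_neg_one_cons (by omega)
    have htail : pvALoop (xs ++ [x]) (PySem.List.pyRange ((xs.length : Int) - 1) (-1) (-1))
        = latest_content_line_index_py xs := by
      rw [latest_content_line_index_py]
      exact pvALoop_congr _ _ _ (fun i hi => by
        have := (PySem.List.mem_pyRange_neg_one).1 hi
        exact pvGet_append_left xs x i (by omega) (by omega))
    rw [latest_content_line_index_py, hlen, hcons]
    simp only [pvALoop, pvGet_append_last]
    by_cases h1 : PySem.Str.strip x = ""
    · simp [h1, htail, ih]
    · by_cases h2 : PySem.Chars.startswith (PySem.Chars.strip x.toList) ['#'] = true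
      · simp [h1, h2, htail, ih]
      · simp [h1, h2]

-- ===== VERDICT (by name: the statement is the Claim_ definition above) =====
theorem latest_content_line_index_py_spec : Claim_equal_latest_content_line_index_py := by
  intro lines _
  unfold Spec_latest_content_line_index_py
  exact pvAB lines
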